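-- pv_equiv track=rewrite | github.com/galaxy821/Algorithm | Implementation/pg/pg_72134.py | solution
-- ===== SOURCE A (Python) =====
-- def solution(board, skill):
--     answer = 0
--
--     temp = [[0] * (len(board[0])+1) for _ in range(len(board)+1)]
--
--     for typ, r1, c1, r2, c2, degree in skill:
--         temp[r1][c1] += degree if typ == 2 else -degree
--         temp[r1][c2 + 1] += -degree if typ == 2 else degree
--         temp[r2 + 1][c1] += -degree if typ == 2 else degree
--         temp[r2 + 1][c2 + 1] += degree if typ == 2 else -degree
--
--     for i in range(len(temp)-1):
--         for j in range(len(temp[0])-1):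
--             temp[i][j + 1] += temp[i][j]
--
--     for j in range(len(temp[0])-1):
--         for i in range(len(temp)-1):
--             temp[i + 1][j] += temp[i][j]
--
--     for i in range(len(board)):
--         for j in range(len(board[0])):
--             board[i][j] += temp[i][j]
--             if board[i][j] > 0:
--                 answer += 1
--
--     return answer
-- ===== SOURCE B (Python) =====
-- def solution(board, skill):
--     n, m = len(board), len(board[0])
--     for typ, r1, c1, r2, c2, degree in skill:
--         d = degree if typ == 2 else -degree
--         for i in range(r1, r2 + 1):
--             for j in range(c1, c2 + 1):
--                 board[i][j] += d
--     return sum(1 for i in range(n) for j in range(m) if board[i][j] > 0)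
-- ===== Notes on version B (the rewrite author's own statement) =====
-- stated objective: simpler
-- what changed: Replaced the 2D difference array with its two prefix-sum passes by direct per-skill rectangle updates on the board followed by one counting pass over the n*m grid; shorter and plainer, though O(area) per skill instead of O(1).
-- outside the precondition, e.g. on solution([[1]], [[2, -1, 0, -1, 0, 5]]): A returns 0, B returns 1; on solution([[1], [1], [1]], [[2, 2, 0, 0, 0, 3]]): A returns 2, B returns 3
import Mathlib
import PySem

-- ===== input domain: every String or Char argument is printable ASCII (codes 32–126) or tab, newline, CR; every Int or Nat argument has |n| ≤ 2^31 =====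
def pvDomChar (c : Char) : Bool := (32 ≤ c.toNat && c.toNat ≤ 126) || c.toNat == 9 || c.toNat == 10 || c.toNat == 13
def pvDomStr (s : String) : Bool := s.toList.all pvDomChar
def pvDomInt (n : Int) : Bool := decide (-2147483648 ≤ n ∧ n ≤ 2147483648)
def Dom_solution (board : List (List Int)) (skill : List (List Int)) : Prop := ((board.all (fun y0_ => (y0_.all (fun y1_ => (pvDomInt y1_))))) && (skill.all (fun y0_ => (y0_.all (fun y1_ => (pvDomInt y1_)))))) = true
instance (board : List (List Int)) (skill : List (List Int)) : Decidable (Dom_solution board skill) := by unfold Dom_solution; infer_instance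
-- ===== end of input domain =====

-- B replaces A's 2D difference array and its two prefix-sum passes by direct per-skill
-- rectangle updates followed by one counting pass (objective: simpler).  Both Pythons
-- mutate `board` in place; the equivalence proved here is about the RETURN value only.

-- shared cell primitives (board[i][j] read / board[r][c] += v)
def get2 (t : List (List Int)) (i j : Nat) : Int := (t.getD i []).getD j 0
def upd2 (t : List (List Int)) (r c : Nat) (v : Int) : List (List Int) :=
  t.modify r (fun row => row.modify c (fun x => x + v))

-- ===== PORT A =====
-- one iteration of A's skill loop: the four difference-array corner updates
def skillStep (t : List (List Int)) (s : List Int) : List (List Int) :=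
  match s with
  | [typ, r1, c1, r2, c2, degree] =>
    let t1 := upd2 t r1.toNat c1.toNat (if typ == 2 then degree else -degree)
    let t2 := upd2 t1 r1.toNat (c2 + 1).toNat (if typ == 2 then -degree else degree)
    let t3 := upd2 t2 (r2 + 1).toNat c1.toNat (if typ == 2 then -degree else degree)
    upd2 t3 (r2 + 1).toNat (c2 + 1).toNat (if typ == 2 then degree else -degree)
  | _ => t

-- A's running row-prefix pass: temp[i][j+1] += temp[i][j]
def rowPass (t : List (List Int)) : List (List Int) :=
  (List.range (t.length - 1)).foldl (fun t' i =>
    (List.range ((t.getD 0 []).length - 1)).foldl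
      (fun t'' j => upd2 t'' i (j + 1) (get2 t'' i j)) t') t

-- A's running column-prefix pass: temp[i+1][j] += temp[i][j]
def colPass (t : List (List Int)) : List (List Int) :=
  (List.range ((t.getD 0 []).length - 1)).foldl (fun t' j =>
    (List.range (t.length - 1)).foldl
      (fun t'' i => upd2 t'' (i + 1) j (get2 t'' i j)) t') t

-- A's final pass: board[i][j] += temp[i][j]; if board[i][j] > 0: answer += 1
def countStep (t : List (List Int)) (s : List (List Int) × Int) (i j : Nat) :
    List (List Int) × Int :=
  let b := upd2 s.1 i j (get2 t i j)
  (b, if get2 b i j > 0 then s.2 + 1 else s.2)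

def solution (board : List (List Int)) (skill : List (List Int)) : Int :=
  let temp0 := List.replicate (board.length + 1)
      (List.replicate (((PySem.List.pyGet? board 0).getD []).length + 1) (0 : Int))
  let t1 := skill.foldl skillStep temp0
  let t2 := rowPass t1
  let t3 := colPass t2
  let fin := (List.range board.length).foldl (fun s i =>
    (List.range ((board.getD 0 []).length)).foldl (fun s j => countStep t3 s i j) s)
    (board, (0 : Int))
  fin.2

-- ===== PORT B =====
-- one iteration of B's skill loop: add d to every cell of the rectangle
def applySkill (t : List (List Int)) (s : List Int) : List (List Int) :=
  match s with
  | [typ, r1, c1, r2, c2, degree] =>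
    let d := if typ == 2 then degree else -degree
    (PySem.List.pyRange r1 (r2 + 1) 1).foldl (fun t' i =>
      (PySem.List.pyRange c1 (c2 + 1) 1).foldl (fun t'' j =>
        upd2 t'' i.toNat j.toNat d) t') t
  | _ => t

def solution_alt (board : List (List Int)) (skill : List (List Int)) : Int :=
  let n := board.length
  let m := ((PySem.List.pyGet? board 0).getD []).length
  let fb := skill.foldl applySkill board
  (List.range n).foldl (fun a i =>
    (List.range m).foldl (fun a' j => if get2 fb i j > 0 then a' + 1 else a') a) 0

-- ===== PRECONDITION & SPEC =====
-- Pre_ excludes: the empty board, skill rows not of length 6 and rows shorter than the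
-- first row or row/column bounds outside the board (on all of which A raises IndexError /
-- ValueError), and negative coordinates and inverted rectangles (r1 > r2 or c1 > c2),
-- on which A returns but its negative-index wraparound and difference-array leftovers
-- are accidents of its implementation.
def Pre_solution (board : List (List Int)) (skill : List (List Int)) : Prop :=
  board ≠ [] ∧
  (∀ row ∈ board, (board.headD []).length ≤ row.length) ∧
  (∀ s ∈ skill, s.length = 6 ∧
    0 ≤ s.getD 1 0 ∧ s.getD 1 0 ≤ s.getD 3 0 ∧ s.getD 3 0 < (board.length : Int) ∧
    0 ≤ s.getD 2 0 ∧ s.getD 2 0 ≤ s.getD 4 0 ∧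
    s.getD 4 0 < ((board.headD []).length : Int))

instance (board : List (List Int)) (skill : List (List Int)) :
    Decidable (Pre_solution board skill) := by unfold Pre_solution; infer_instance

def pvWitness_solution : List (List Int) × List (List Int) :=
  ([[1, -1], [0, 2]], [[2, 0, 0, 1, 1, 3], [1, 0, 1, 0, 1, 2]])

def Spec_solution (board : List (List Int)) (skill : List (List Int)) (out : Int) : Prop :=
  out = solution_alt board skill
instance (board : List (List Int)) (skill : List (List Int)) (out : Int) :
    Decidable (Spec_solution board skill out) := by unfold Spec_solution; infer_instance

-- ===== CLAIM (what is proved, stated in full; the proofs are below) =====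
def Claim_equal_solution : Prop := ∀ (board : List (List Int)) (skill : List (List Int)),
  Dom_solution board skill → Pre_solution board skill →
  Spec_solution board skill (solution board skill)

-- ===== LEMMAS AND PROOFS =====

-- rectangularity of a list-of-lists matrix
def Rect (t : List (List Int)) (R C : Nat) : Prop :=
  t.length = R ∧ ∀ row ∈ t, row.length = C

-- R rows, every row at least C cells (a ragged board as A accepts it)
def RectGe (t : List (List Int)) (R C : Nat) : Prop :=
  t.length = R ∧ ∀ row ∈ t, C ≤ row.length

-- s is a well-formed skill row for an R×C board
def ValidS (s : List Int) (R C : Nat) : Prop :=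
  s.length = 6 ∧ 0 ≤ s.getD 1 0 ∧ s.getD 1 0 ≤ s.getD 3 0 ∧ s.getD 3 0 < (R : Int) ∧
  0 ≤ s.getD 2 0 ∧ s.getD 2 0 ≤ s.getD 4 0 ∧ s.getD 4 0 < (C : Int)

-- A's per-skill corner delta, as a function of the cell
def dlt (s : List Int) (i j : Nat) : Int :=
  match s with
  | [typ, r1, c1, r2, c2, degree] =>
    let d := if typ == 2 then degree else -degree
    (if i = r1.toNat ∧ j = c1.toNat then d else 0) +
    (if i = r1.toNat ∧ j = (c2 + 1).toNat then -d else 0) +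
    (if i = (r2 + 1).toNat ∧ j = c1.toNat then -d else 0) +
    (if i = (r2 + 1).toNat ∧ j = (c2 + 1).toNat then d else 0)
  | _ => 0

-- B's per-skill rectangle indicator
def rectInd (s : List Int) (i j : Nat) : Int :=
  match s with
  | [typ, r1, c1, r2, c2, degree] =>
    if r1 ≤ (i : Int) ∧ (i : Int) ≤ r2 ∧ c1 ≤ (j : Int) ∧ (j : Int) ≤ c2 then
      (if typ == 2 then degree else -degree) else 0
  | _ => 0

def sumD {α : Type} (l : List α) (f : α → Int) : Int := (l.map f).sum

-- running prefix sums of a row / a column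
def rowSum (t : List (List Int)) (i j : Nat) : Int := sumD (List.range (j + 1)) (get2 t i)
def colSum (t : List (List Int)) (i j : Nat) : Int :=
  sumD (List.range (i + 1)) (fun i' => get2 t i' j)

theorem getD_modify {α : Type} (l : List α) (f : α → α) (r i : Nat) (d : α) :
    (l.modify r f).getD i d =
      if h : r = i ∧ i < l.length then f (l[i]) else l.getD i d := by
  rw [List.getD_eq_getElem?_getD, List.getElem?_modify]
  by_cases hil : i < l.length
  · rw [List.getElem?_eq_getElem hil]
    by_cases hri : r = i
    · simp [hri, hil]
    · simp [hri, hil]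
  · rw [List.getElem?_eq_none (by omega)]
    have h2 : ¬ (r = i ∧ i < l.length) := fun hh => hil hh.2
    simp [h2, List.getD_eq_getElem?_getD, List.getElem?_eq_none (show l.length ≤ i by omega)]

theorem upd2_length (t : List (List Int)) (r c : Nat) (v : Int) :
    (upd2 t r c v).length = t.length := by
  simp [upd2]

theorem rect_upd2 {t : List (List Int)} {R C : Nat} (h : Rect t R C) (r c : Nat) (v : Int) :
    Rect (upd2 t r c v) R C := by
  obtain ⟨hl, hr⟩ := h
  refine ⟨by rw [upd2_length]; exact hl, ?_⟩
  intro row hrow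
  rw [List.mem_iff_getElem] at hrow
  obtain ⟨k, hk, rfl⟩ := hrow
  have hk' : k < t.length := by simpa [upd2_length] using hk
  simp only [upd2] at hk ⊢
  rw [List.getElem_modify]
  split
  · rw [List.length_modify]
    exact hr _ (List.getElem_mem hk')
  · exact hr _ (List.getElem_mem hk')

theorem rect_ge {t : List (List Int)} {R C : Nat} (h : Rect t R C) : RectGe t R C :=
  ⟨h.1, fun row hr => (h.2 row hr).ge⟩

theorem rectGe_upd2 {t : List (List Int)} {R C : Nat} (h : RectGe t R C) (r c : Nat)
    (v : Int) : RectGe (upd2 t r c v) R C := by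
  obtain ⟨hl, hr⟩ := h
  refine ⟨by rw [upd2_length]; exact hl, ?_⟩
  intro row hrow
  rw [List.mem_iff_getElem] at hrow
  obtain ⟨k, hk, rfl⟩ := hrow
  have hk' : k < t.length := by simpa [upd2_length] using hk
  simp only [upd2] at hk ⊢
  rw [List.getElem_modify]
  split
  · rw [List.length_modify]
    exact hr _ (List.getElem_mem hk')
  · exact hr _ (List.getElem_mem hk')

theorem get2_upd2 {t : List (List Int)} {R C : Nat} (h : RectGe t R C)
    {r c : Nat} (hr : r < R) (hc : c < C) (v : Int) (i j : Nat) :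
    get2 (upd2 t r c v) i j = get2 t i j + (if i = r ∧ j = c then v else 0) := by
  obtain ⟨hl, hrow⟩ := h
  have hilen' : r < t.length := hl ▸ hr
  unfold get2 upd2
  rw [getD_modify]
  split
  · next hcase =>
    obtain ⟨hri, hilen⟩ := hcase
    have hcr : c < (t[i]'hilen).length :=
      lt_of_lt_of_le hc (hrow _ (List.getElem_mem hilen))
    rw [getD_modify]
    split
    · next hc2 =>
      obtain ⟨hcj, hjlen⟩ := hc2
      subst hri; subst hcj
      simp [List.getD_eq_getElem?_getD, List.getElem?_eq_getElem hilen,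
        List.getElem?_eq_getElem hjlen]
    · next hc2 =>
      subst hri
      have hjc : j ≠ c := fun hj => hc2 ⟨hj.symm, hj ▸ hcr⟩
      simp [List.getD_eq_getElem?_getD, List.getElem?_eq_getElem hilen, hjc]
  · next hcase =>
    by_cases hri : r = i
    · exact absurd ⟨hri, by omega⟩ hcase
    · have hnot : ¬ (i = r ∧ j = c) := fun hh => hri hh.1.symm
      simp [hnot]

theorem rect_getD_length {t : List (List Int)} {R C : Nat} (h : Rect t R C)
    {i : Nat} (hi : i < R) : (t.getD i []).length = C := by
  obtain ⟨hl, hr⟩ := h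
  have hi' : i < t.length := hl ▸ hi
  rw [List.getD_eq_getElem _ _ hi']
  exact hr _ (List.getElem_mem hi')

-- ---- sum helpers ----
theorem sumD_add {α : Type} (l : List α) (f g : α → Int) :
    sumD l (fun x => f x + g x) = sumD l f + sumD l g := by
  induction l with
  | nil => simp [sumD]
  | cons a l ih => simp [sumD, List.map_cons] at ih ⊢; omega

theorem sumD_congr {α : Type} {l : List α} {f g : α → Int}
    (h : ∀ x ∈ l, f x = g x) : sumD l f = sumD l g := by
  unfold sumD; rw [List.map_congr_left h]

theorem sumD_swap {α β : Type} (l : List α) (l' : List β) (f : α → β → Int) :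
    sumD l (fun x => sumD l' (f x)) = sumD l' (fun y => sumD l (fun x => f x y)) := by
  induction l with
  | nil => simp [sumD]
  | cons a l ih =>
    simp only [sumD, List.map_cons, List.sum_cons] at ih ⊢
    rw [ih, ← sumD, ← sumD, ← sumD_add]
    rfl

theorem sumD_range_ite (K a : Nat) (w : Int) :
    sumD (List.range K) (fun x => if x = a then w else 0) = if a < K then w else 0 := by
  induction K with
  | zero => simp [sumD]
  | succ K ih =>
    rw [List.range_succ]
    simp only [sumD, List.map_append, List.sum_append] at ih ⊢
    rw [ih]
    by_cases hK : K = a <;> by_cases ha : a < K <;> simp [hK, ha] <;> omega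

theorem rowSum_succ (t : List (List Int)) (i j : Nat) :
    rowSum t i (j + 1) = rowSum t i j + get2 t i (j + 1) := by
  unfold rowSum sumD
  rw [List.range_succ, List.map_append, List.sum_append]
  simp

theorem colSum_succ (t : List (List Int)) (i j : Nat) :
    colSum t (i + 1) j = colSum t i j + get2 t (i + 1) j := by
  unfold colSum sumD
  rw [List.range_succ, List.map_append, List.sum_append]
  simp

-- ---- Stage A1: the skill fold builds the corner-delta table ----
theorem skillStep_get2 {t : List (List Int)} {R C : Nat} {s : List Int}
    (hv : ValidS s R C) (h : Rect t (R + 1) (C + 1)) :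
    Rect (skillStep t s) (R + 1) (C + 1) ∧
    ∀ i j, get2 (skillStep t s) i j = get2 t i j + dlt s i j := by
  obtain ⟨hlen, h1, h2, h3, h4, h5, h6⟩ := hv
  rcases s with _ | ⟨x0, _ | ⟨x1, _ | ⟨x2, _ | ⟨x3, _ | ⟨x4, _ | ⟨x5, rest⟩⟩⟩⟩⟩⟩ <;>
    simp only [List.length_cons, List.length_nil] at hlen <;> try omega
  have hrest : rest = [] := by
    cases rest with
    | nil => rfl
    | cons a r => simp only [List.length_cons] at hlen; omega
  subst hrest
  simp only [List.getD_cons_succ, List.getD_cons_zero] at h1 h2 h3 h4 h5 h6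
  have hb1 : x1.toNat < R + 1 := by omega
  have hb2 : x2.toNat < C + 1 := by omega
  have hb3 : (x3 + 1).toNat < R + 1 := by omega
  have hb4 : (x4 + 1).toNat < C + 1 := by omega
  have ht1 := rect_upd2 h x1.toNat x2.toNat (if x0 == 2 then x5 else -x5)
  have ht2 := rect_upd2 ht1 x1.toNat (x4 + 1).toNat (if x0 == 2 then -x5 else x5)
  have ht3 := rect_upd2 ht2 (x3 + 1).toNat x2.toNat (if x0 == 2 then -x5 else x5)
  have ht4 := rect_upd2 ht3 (x3 + 1).toNat (x4 + 1).toNat (if x0 == 2 then x5 else -x5)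
  refine ⟨ht4, fun i j => ?_⟩
  show get2 (upd2 (upd2 (upd2 (upd2 t _ _ _) _ _ _) _ _ _) _ _ _) i j = _
  rw [get2_upd2 (rect_ge ht3) hb3 hb4, get2_upd2 (rect_ge ht2) hb3 hb2,
    get2_upd2 (rect_ge ht1) hb1 hb4, get2_upd2 (rect_ge h) hb1 hb2]
  simp only [dlt]
  by_cases hx : x0 == 2
  · simp only [hx, if_true]
    ring_nf
  · simp only [hx, Bool.false_eq_true, if_false]
    ring_nf

theorem skillFold_get2 {R C : Nat} (l : List (List Int)) :
    ∀ (t : List (List Int)), (∀ s ∈ l, ValidS s R C) → Rect t (R + 1) (C + 1) →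
    Rect (l.foldl skillStep t) (R + 1) (C + 1) ∧
    ∀ i j, get2 (l.foldl skillStep t) i j = get2 t i j + sumD l (fun s => dlt s i j) := by
  induction l with
  | nil => intro t _ ht; exact ⟨ht, by simp [sumD]⟩
  | cons s l ih =>
    intro t hv ht
    obtain ⟨h1, h2⟩ := skillStep_get2 (hv s (by simp)) ht
    obtain ⟨h3, h4⟩ := ih (skillStep t s) (fun x hx => hv x (by simp [hx])) h1
    refine ⟨h3, fun i j => ?_⟩
    rw [List.foldl_cons, h4, h2]
    simp [sumD, List.map_cons]
    omega

-- ---- Stage A2: the running row-prefix pass ----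
theorem rowFold_get2 {R C : Nat} {i : Nat} (hi : i < R) :
    ∀ (k : Nat), k < C → ∀ (t : List (List Int)), Rect t R C →
    Rect ((List.range k).foldl (fun a j => upd2 a i (j + 1) (get2 a i j)) t) R C ∧
    (∀ i' j', i' ≠ i →
      get2 ((List.range k).foldl (fun a j => upd2 a i (j + 1) (get2 a i j)) t) i' j' =
        get2 t i' j') ∧
    (∀ j, j ≤ k →
      get2 ((List.range k).foldl (fun a j => upd2 a i (j + 1) (get2 a i j)) t) i j =
        rowSum t i j) ∧
    (∀ j, k < j →
      get2 ((List.range k).foldl (fun a j => upd2 a i (j + 1) (get2 a i j)) t) i j =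
        get2 t i j) := by
  intro k
  induction k with
  | zero =>
    intro _ t ht
    refine ⟨by simpa using ht, by simp, ?_, by simp⟩
    intro j hj
    interval_cases j
    simp [rowSum, sumD]
  | succ k ih =>
    intro hk t ht
    have hk' : k < C := by omega
    obtain ⟨ihR, ihO, ihLe, ihGt⟩ := ih hk' t ht
    rw [List.range_succ, List.foldl_append, List.foldl_cons, List.foldl_nil]
    set u := (List.range k).foldl (fun a j => upd2 a i (j + 1) (get2 a i j)) t with hu
    have hgu := get2_upd2 (rect_ge ihR) hi hk (get2 u i k)
    refine ⟨rect_upd2 ihR _ _ _, ?_, ?_, ?_⟩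
    · intro i' j' hne
      rw [hgu i' j']
      simp [hne]
      exact ihO i' j' hne
    · intro j hj
      rw [hgu i j]
      by_cases hj1 : j = k + 1
      · subst hj1
        rw [if_pos ⟨rfl, rfl⟩, ihGt (k + 1) (by omega), ihLe k le_rfl, rowSum_succ]
        ring
      · simp only [hj1, and_false, if_false, add_zero]
        exact ihLe j (by omega)
    · intro j hj
      rw [hgu i j]
      simp only [show j ≠ k + 1 by omega, and_false, if_false, add_zero]
      exact ihGt j (by omega)

theorem rowPass_get2 {R C : Nat} (hC : 0 < C) :
    ∀ (is : List Nat), is.Nodup → (∀ i ∈ is, i < R) → ∀ (t : List (List Int)), Rect t R C →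
    Rect (is.foldl (fun a i =>
        (List.range (C - 1)).foldl (fun a' j => upd2 a' i (j + 1) (get2 a' i j)) a) t) R C ∧
    (∀ i' j', i' ∉ is →
      get2 (is.foldl (fun a i =>
        (List.range (C - 1)).foldl (fun a' j => upd2 a' i (j + 1) (get2 a' i j)) a) t) i' j' =
        get2 t i' j') ∧
    (∀ i ∈ is, ∀ j, j < C →
      get2 (is.foldl (fun a i =>
        (List.range (C - 1)).foldl (fun a' j => upd2 a' i (j + 1) (get2 a' i j)) a) t) i j =
        rowSum t i j) := by
  intro is
  induction is with
  | nil => intro _ _ t ht; exact ⟨ht, by simp, by simp⟩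
  | cons i is ih =>
    intro hnd hbnd t ht
    rw [List.nodup_cons] at hnd
    obtain ⟨hnotin, hnd⟩ := hnd
    have hiR : i < R := hbnd i (by simp)
    rw [List.foldl_cons]
    obtain ⟨uR, uO, uLe, uGt⟩ := rowFold_get2 hiR (C - 1) (by omega) t ht
    set u := (List.range (C - 1)).foldl (fun a' j => upd2 a' i (j + 1) (get2 a' i j)) t with hu
    obtain ⟨vR, vO, vIn⟩ := ih hnd (fun x hx => hbnd x (by simp [hx])) u uR
    refine ⟨vR, ?_, ?_⟩
    · intro i' j' hni
      simp only [List.mem_cons, not_or] at hni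
      rw [vO i' j' hni.2]
      exact uO i' j' hni.1
    · intro i'' hmem j hj
      rcases List.mem_cons.mp hmem with hh | hh
      · subst hh
        rw [vO i'' j hnotin]
        exact uLe j (by omega)
      · rw [vIn i'' hh j hj]
        unfold rowSum
        apply sumD_congr
        intro x _
        exact uO i'' x (fun he => hnotin (he ▸ hh))

-- ---- Stage A3: the running column-prefix pass ----
theorem colFold_get2 {R C : Nat} {j : Nat} (hj : j < C) :
    ∀ (k : Nat), k < R → ∀ (t : List (List Int)), Rect t R C →
    Rect ((List.range k).foldl (fun a i => upd2 a (i + 1) j (get2 a i j)) t) R C ∧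
    (∀ i' j', j' ≠ j →
      get2 ((List.range k).foldl (fun a i => upd2 a (i + 1) j (get2 a i j)) t) i' j' =
        get2 t i' j') ∧
    (∀ i, i ≤ k →
      get2 ((List.range k).foldl (fun a i => upd2 a (i + 1) j (get2 a i j)) t) i j =
        colSum t i j) ∧
    (∀ i, k < i →
      get2 ((List.range k).foldl (fun a i => upd2 a (i + 1) j (get2 a i j)) t) i j =
        get2 t i j) := by
  intro k
  induction k with
  | zero =>
    intro _ t ht
    refine ⟨by simpa using ht, by simp, ?_, by simp⟩
    intro i hi
    interval_cases i
    simp [colSum, sumD]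
  | succ k ih =>
    intro hk t ht
    have hk' : k < R := by omega
    obtain ⟨ihR, ihO, ihLe, ihGt⟩ := ih hk' t ht
    rw [List.range_succ, List.foldl_append, List.foldl_cons, List.foldl_nil]
    set u := (List.range k).foldl (fun a i => upd2 a (i + 1) j (get2 a i j)) t with hu
    have hgu := get2_upd2 (rect_ge ihR) hk hj (get2 u k j)
    refine ⟨rect_upd2 ihR _ _ _, ?_, ?_, ?_⟩
    · intro i' j' hne
      rw [hgu i' j']
      simp [hne]
      exact ihO i' j' hne
    · intro i hi
      rw [hgu i j]
      by_cases hi1 : i = k + 1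
      · subst hi1
        rw [if_pos ⟨rfl, rfl⟩, ihGt (k + 1) (by omega), ihLe k le_rfl, colSum_succ]
        ring
      · simp only [hi1, false_and, if_false, add_zero]
        exact ihLe i (by omega)
    · intro i hi
      rw [hgu i j]
      simp only [show i ≠ k + 1 by omega, false_and, if_false, add_zero]
      exact ihGt i (by omega)

theorem colPass_get2 {R C : Nat} (hR : 0 < R) :
    ∀ (js : List Nat), js.Nodup → (∀ j ∈ js, j < C) → ∀ (t : List (List Int)), Rect t R C →
    Rect (js.foldl (fun a j =>
        (List.range (R - 1)).foldl (fun a' i => upd2 a' (i + 1) j (get2 a' i j)) a) t) R C ∧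
    (∀ i' j', j' ∉ js →
      get2 (js.foldl (fun a j =>
        (List.range (R - 1)).foldl (fun a' i => upd2 a' (i + 1) j (get2 a' i j)) a) t) i' j' =
        get2 t i' j') ∧
    (∀ j ∈ js, ∀ i, i < R →
      get2 (js.foldl (fun a j =>
        (List.range (R - 1)).foldl (fun a' i => upd2 a' (i + 1) j (get2 a' i j)) a) t) i j =
        colSum t i j) := by
  intro js
  induction js with
  | nil => intro _ _ t ht; exact ⟨ht, by simp, by simp⟩
  | cons j js ih =>
    intro hnd hbnd t ht
    rw [List.nodup_cons] at hnd
    obtain ⟨hnotin, hnd⟩ := hnd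
    have hjC : j < C := hbnd j (by simp)
    rw [List.foldl_cons]
    obtain ⟨uR, uO, uLe, uGt⟩ := colFold_get2 hjC (R - 1) (by omega) t ht
    set u := (List.range (R - 1)).foldl (fun a' i => upd2 a' (i + 1) j (get2 a' i j)) t with hu
    obtain ⟨vR, vO, vIn⟩ := ih hnd (fun x hx => hbnd x (by simp [hx])) u uR
    refine ⟨vR, ?_, ?_⟩
    · intro i' j' hnj
      simp only [List.mem_cons, not_or] at hnj
      rw [vO i' j' hnj.2]
      exact uO i' j' hnj.1
    · intro j'' hmem i hi
      rcases List.mem_cons.mp hmem with hh | hh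
      · subst hh
        rw [vO i j'' hnotin]
        exact uLe i (by omega)
      · rw [vIn j'' hh i hi]
        unfold colSum
        apply sumD_congr
        intro x _
        exact uO x j'' (fun he => hnotin (he ▸ hh))

-- ---- Stage A4: box sum of the corner deltas is the rectangle indicator ----
theorem sumD_zero {α : Type} (l : List α) : sumD l (fun _ => (0 : Int)) = 0 := by
  simp [sumD]

theorem sumD_range_ite2 (I J a b : Nat) (v : Int) :
    sumD (List.range I) (fun x => sumD (List.range J) (fun y => if x = a ∧ y = b then v else 0)) =
      if a < I ∧ b < J then v else 0 := by
  have h1 : ∀ x, sumD (List.range J) (fun y => if x = a ∧ y = b then v else 0)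
      = if x = a then (if b < J then v else 0) else 0 := by
    intro x
    by_cases hx : x = a
    · subst hx
      simp only [true_and]
      exact sumD_range_ite J b v
    · simp only [hx, false_and, if_false]
      exact sumD_zero _
  rw [sumD_congr (fun x _ => h1 x), sumD_range_ite]
  by_cases h2 : a < I <;> by_cases h3 : b < J <;> simp [h2, h3]

theorem dlt_box {R C : Nat} {s : List Int} (hv : ValidS s R C) (i j : Nat) :
    sumD (List.range (i + 1)) (fun i' => sumD (List.range (j + 1)) (fun j' => dlt s i' j')) =
      rectInd s i j := by
  obtain ⟨hlen, h1, h2, h3, h4, h5, h6⟩ := hv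
  rcases s with _ | ⟨x0, _ | ⟨x1, _ | ⟨x2, _ | ⟨x3, _ | ⟨x4, _ | ⟨x5, rest⟩⟩⟩⟩⟩⟩ <;>
    simp only [List.length_cons, List.length_nil] at hlen <;> try omega
  have hrest : rest = [] := by
    cases rest with
    | nil => rfl
    | cons a r => simp only [List.length_cons] at hlen; omega
  subst hrest
  simp only [List.getD_cons_succ, List.getD_cons_zero] at h1 h2 h3 h4 h5 h6
  by_cases hx : x0 == 2 <;>
    simp only [dlt, rectInd, hx, if_true, if_false, Bool.false_eq_true] <;>
  · rw [sumD_congr (fun i' (_ : i' ∈ List.range (i + 1)) => by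
        rw [sumD_add, sumD_add, sumD_add]),
      sumD_add, sumD_add, sumD_add,
      sumD_range_ite2, sumD_range_ite2, sumD_range_ite2, sumD_range_ite2]
    split_ifs <;> omega

-- ---- Stage B: direct rectangle updates ----
theorem bColFold_get2 {R C : Nat} {r : Nat} (hr : r < R) (d : Int) (b : Int)
    (hb : b ≤ (C : Int)) :
    ∀ (fuel : Nat) (a : Int) (t : List (List Int)), 0 ≤ a → fuel = (b - a).toNat →
      RectGe t R C →
    RectGe ((PySem.List.pyRange a b 1).foldl (fun t'' j => upd2 t'' r j.toNat d) t) R C ∧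
    ∀ i j, i < R → j < C →
      get2 ((PySem.List.pyRange a b 1).foldl (fun t'' j => upd2 t'' r j.toNat d) t) i j =
        get2 t i j + (if i = r ∧ a ≤ (j : Int) ∧ (j : Int) < b then d else 0) := by
  intro fuel
  induction fuel with
  | zero =>
    intro a t ha hf ht
    rw [PySem.List.pyRange_one_eq_nil (by omega)]
    refine ⟨ht, fun i j hi hj => ?_⟩
    simp only [List.foldl_nil]
    generalize get2 t i j = G
    split_ifs <;> omega
  | succ fuel ih =>
    intro a t ha hf ht
    have hab : a < b := by omega
    rw [PySem.List.pyRange_one_cons hab, List.foldl_cons]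
    have hta : a.toNat < C := by omega
    have ht1 := rectGe_upd2 ht r a.toNat d
    obtain ⟨hR, hG⟩ := ih (a + 1) (upd2 t r a.toNat d) (by omega) (by omega) ht1
    refine ⟨hR, fun i j hi hj => ?_⟩
    rw [hG i j hi hj, get2_upd2 ht hr hta d i j]
    generalize get2 t i j = G
    split_ifs <;> omega

theorem bRowFold_get2 {R C : Nat} (d : Int) (b c1 c2' : Int)
    (hb : b ≤ (R : Int)) (hc1 : 0 ≤ c1) (hc2 : c2' ≤ (C : Int)) :
    ∀ (fuel : Nat) (a : Int) (t : List (List Int)), 0 ≤ a → fuel = (b - a).toNat →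
      RectGe t R C →
    RectGe ((PySem.List.pyRange a b 1).foldl (fun t' i =>
        (PySem.List.pyRange c1 c2' 1).foldl (fun t'' j => upd2 t'' i.toNat j.toNat d) t') t) R C ∧
    ∀ i j, i < R → j < C →
      get2 ((PySem.List.pyRange a b 1).foldl (fun t' i =>
        (PySem.List.pyRange c1 c2' 1).foldl (fun t'' j => upd2 t'' i.toNat j.toNat d) t') t) i j =
        get2 t i j +
          (if a ≤ (i : Int) ∧ (i : Int) < b ∧ c1 ≤ (j : Int) ∧ (j : Int) < c2' then d else 0) := by
  intro fuel
  induction fuel with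
  | zero =>
    intro a t ha hf ht
    rw [show PySem.List.pyRange a b 1 = [] from PySem.List.pyRange_one_eq_nil (by omega)]
    refine ⟨ht, fun i j hi hj => ?_⟩
    simp only [List.foldl_nil]
    generalize get2 t i j = G
    split_ifs <;> omega
  | succ fuel ih =>
    intro a t ha hf ht
    have hab : a < b := by omega
    rw [show PySem.List.pyRange a b 1 = a :: PySem.List.pyRange (a + 1) b 1 from
      PySem.List.pyRange_one_cons hab, List.foldl_cons]
    have hta : a.toNat < R := by omega
    obtain ⟨h1R, h1G⟩ := bColFold_get2 hta d c2' hc2 (c2' - c1).toNat c1 t hc1 rfl ht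
    set u := (PySem.List.pyRange c1 c2' 1).foldl (fun t'' j => upd2 t'' a.toNat j.toNat d) t
      with hu
    obtain ⟨hR, hG⟩ := ih (a + 1) u (by omega) (by omega) h1R
    refine ⟨hR, fun i j hi hj => ?_⟩
    rw [hG i j hi hj, h1G i j hi hj]
    generalize get2 t i j = G
    split_ifs <;> omega

theorem applySkill_get2 {R C : Nat} {s : List Int} (hv : ValidS s R C)
    {t : List (List Int)} (h : RectGe t R C) :
    RectGe (applySkill t s) R C ∧
    ∀ i j, i < R → j < C → get2 (applySkill t s) i j = get2 t i j + rectInd s i j := by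
  obtain ⟨hlen, h1, h2, h3, h4, h5, h6⟩ := hv
  rcases s with _ | ⟨x0, _ | ⟨x1, _ | ⟨x2, _ | ⟨x3, _ | ⟨x4, _ | ⟨x5, rest⟩⟩⟩⟩⟩⟩ <;>
    simp only [List.length_cons, List.length_nil] at hlen <;> try omega
  have hrest : rest = [] := by
    cases rest with
    | nil => rfl
    | cons a r => simp only [List.length_cons] at hlen; omega
  subst hrest
  simp only [List.getD_cons_succ, List.getD_cons_zero] at h1 h2 h3 h4 h5 h6
  simp only [applySkill, rectInd]
  set D := (if x0 == 2 then x5 else -x5) with hD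
  obtain ⟨hR, hG⟩ := bRowFold_get2 D (x3 + 1) x2 (x4 + 1) (by omega) (by omega) (by omega)
    ((x3 + 1) - x1).toNat x1 t (by omega) rfl h
  refine ⟨hR, fun i j hi hj => ?_⟩
  rw [hG i j hi hj]
  generalize get2 t i j = G
  split_ifs <;> omega

theorem bFold_get2 {R C : Nat} (l : List (List Int)) :
    ∀ (t : List (List Int)), (∀ s ∈ l, ValidS s R C) → RectGe t R C →
    RectGe (l.foldl applySkill t) R C ∧
    ∀ i j, i < R → j < C →
      get2 (l.foldl applySkill t) i j = get2 t i j + sumD l (fun s => rectInd s i j) := by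
  induction l with
  | nil => intro t _ ht; exact ⟨ht, by simp [sumD]⟩
  | cons s l ih =>
    intro t hv ht
    obtain ⟨h1, h2⟩ := applySkill_get2 (hv s (by simp)) ht
    obtain ⟨h3, h4⟩ := ih (applySkill t s) (fun x hx => hv x (by simp [hx])) h1
    refine ⟨h3, fun i j hi hj => ?_⟩
    rw [List.foldl_cons, h4 i j hi hj, h2 i j hi hj]
    simp [sumD, List.map_cons]
    omega

-- ---- counting ----
theorem cntRow_fold {t3 b0 : List (List Int)} {R C : Nat} {i : Nat} (hi : i < R) :
    ∀ (js : List Nat), js.Nodup → (∀ j ∈ js, j < C) →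
    ∀ (b : List (List Int)) (a : Int), RectGe b R C →
      (∀ j ∈ js, get2 b i j = get2 b0 i j) →
    RectGe (js.foldl (fun s j => countStep t3 s i j) (b, a)).1 R C ∧
    (∀ i' j', i' ≠ i →
      get2 (js.foldl (fun s j => countStep t3 s i j) (b, a)).1 i' j' = get2 b i' j') ∧
    (js.foldl (fun s j => countStep t3 s i j) (b, a)).2 =
      a + ((js.countP (fun j => decide (0 < get2 b0 i j + get2 t3 i j)) : Nat) : Int) := by
  intro js
  induction js with
  | nil => intro _ _ b a hb _; exact ⟨hb, by simp, by simp⟩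
  | cons j js ih =>
    intro hnd hbnd b a hb hag
    rw [List.nodup_cons] at hnd
    obtain ⟨hnotin, hnd⟩ := hnd
    have hjC : j < C := hbnd j (by simp)
    rw [List.foldl_cons]
    have hstep : countStep t3 (b, a) i j =
        (upd2 b i j (get2 t3 i j),
          if 0 < get2 (upd2 b i j (get2 t3 i j)) i j then a + 1 else a) := rfl
    rw [hstep]
    have hb' := rectGe_upd2 hb i j (get2 t3 i j)
    have hgb' := get2_upd2 hb hi hjC (get2 t3 i j)
    have hcell : get2 (upd2 b i j (get2 t3 i j)) i j = get2 b0 i j + get2 t3 i j := by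
      rw [hgb' i j, if_pos ⟨rfl, rfl⟩, hag j (by simp)]
    have hag' : ∀ j' ∈ js, get2 (upd2 b i j (get2 t3 i j)) i j' = get2 b0 i j' := by
      intro j' hj'
      rw [hgb' i j', if_neg (by rintro ⟨-, rfl⟩; exact hnotin hj'), hag j' (by simp [hj'])]
      ring
    obtain ⟨ihR, ihO, ihC⟩ := ih hnd (fun x hx => hbnd x (by simp [hx]))
      (upd2 b i j (get2 t3 i j)) (if 0 < get2 (upd2 b i j (get2 t3 i j)) i j then a + 1 else a)
      hb' hag'
    refine ⟨ihR, ?_, ?_⟩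
    · intro i' j' hne
      rw [ihO i' j' hne, hgb' i' j', if_neg (by rintro ⟨rfl, -⟩; exact hne rfl)]
      ring
    · rw [ihC, List.countP_cons, hcell]
      by_cases hpos : 0 < get2 b0 i j + get2 t3 i j
      · rw [if_pos hpos]
        simp only [hpos, decide_true, if_pos]
        push_cast
        ring
      · rw [if_neg hpos]
        simp only [hpos, decide_false]
        push_cast
        ring

theorem cntRows_fold {t3 b0 : List (List Int)} {R C : Nat} :
    ∀ (is : List Nat), is.Nodup → (∀ i ∈ is, i < R) →
    ∀ (b : List (List Int)) (a : Int), RectGe b R C →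
      (∀ i ∈ is, ∀ j', get2 b i j' = get2 b0 i j') →
    (is.foldl (fun s i => (List.range C).foldl (fun s' j => countStep t3 s' i j) s) (b, a)).2 =
      a + sumD is (fun i =>
        (((List.range C).countP (fun j => decide (0 < get2 b0 i j + get2 t3 i j)) : Nat) : Int)) := by
  intro is
  induction is with
  | nil => intro _ _ b a _ _; simp [sumD]
  | cons i is ih =>
    intro hnd hbnd b a hb hag
    rw [List.nodup_cons] at hnd
    obtain ⟨hnotin, hnd⟩ := hnd
    have hiR : i < R := hbnd i (by simp)
    rw [List.foldl_cons]
    obtain ⟨uR, uO, uC⟩ := cntRow_fold (t3 := t3) (b0 := b0) hiR (List.range C)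
      (List.nodup_range) (fun x hx => List.mem_range.mp hx) b a hb
      (fun j _ => hag i (by simp) j)
    set u := (List.range C).foldl (fun s' j => countStep t3 s' i j) (b, a) with hu
    have hag2 : ∀ i'' ∈ is, ∀ j', get2 u.1 i'' j' = get2 b0 i'' j' := by
      intro i'' hmem j'
      rw [uO i'' j' (fun he => hnotin (he ▸ hmem)), hag i'' (by simp [hmem]) j']
    have := ih hnd (fun x hx => hbnd x (by simp [hx])) u.1 u.2 uR hag2
    rw [Prod.mk.eta] at this
    rw [this, uC]
    simp only [sumD, List.map_cons, List.sum_cons]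
    ring

theorem cntIdx_inner (P : Nat → Prop) [DecidablePred P] (l : List Nat) :
    ∀ a : Int, l.foldl (fun a' j => if P j then a' + 1 else a') a =
      a + ((l.countP (fun j => decide (P j)) : Nat) : Int) := by
  induction l with
  | nil => simp
  | cons x l ih =>
    intro a
    rw [List.foldl_cons, ih, List.countP_cons]
    by_cases hx : P x
    · simp only [hx, if_true, decide_true]
      push_cast
      ring
    · simp only [hx, if_false, decide_false]
      push_cast
      ring

theorem cntIdx_outer (fb : List (List Int)) (m : Nat) (l : List Nat) :
    ∀ a : Int, l.foldl (fun a i =>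
        (List.range m).foldl (fun a' j => if get2 fb i j > 0 then a' + 1 else a') a) a =
      a + sumD l (fun i =>
        (((List.range m).countP (fun j => decide (0 < get2 fb i j)) : Nat) : Int)) := by
  induction l with
  | nil => intro a; simp [sumD]
  | cons i l ih =>
    intro a
    rw [List.foldl_cons, cntIdx_inner (fun j => get2 fb i j > 0), ih]
    simp only [sumD, List.map_cons, List.sum_cons]
    ring

-- get2 of the all-zero temp table
theorem get2_replicate (R C : Nat) (i j : Nat) :
    get2 (List.replicate R (List.replicate C (0 : Int))) i j = 0 := by
  have hrow : (List.replicate R (List.replicate C (0 : Int))).getD i [] =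
      if i < R then List.replicate C 0 else [] := by
    rw [List.getD_eq_getElem?_getD, List.getElem?_replicate]
    split <;> rfl
  unfold get2
  rw [hrow]
  split
  · rw [List.getD_eq_getElem?_getD, List.getElem?_replicate]
    split <;> rfl
  · rfl

theorem rect_replicate (R C : Nat) :
    Rect (List.replicate R (List.replicate C (0 : Int))) R C := by
  constructor
  · simp
  · intro row hrow
    rw [List.eq_of_mem_replicate hrow]
    simp

-- ===== VERDICT (by name: the statement is the Claim_ definition above) =====
theorem solution_spec : Claim_equal_solution := by
  intro board skill _hdom hpre
  unfold Spec_solution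
  obtain ⟨hne, hrows, hsk⟩ := hpre
  set n := board.length with hn
  set m := (board.headD []).length with hm
  have hn0 : 0 < n := by
    cases board with
    | nil => exact absurd rfl hne
    | cons r rest => simp [hn]
  have hRect : RectGe board n m := ⟨rfl, hrows⟩
  have hvalid : ∀ s ∈ skill, ValidS s n m := hsk
  have hw : ((PySem.List.pyGet? board 0).getD []).length = m := by
    cases board with
    | nil => exact absurd rfl hne
    | cons r rest => simp [PySem.List.pyGet?, PySem.List.pyIdx?, hm]
  have hg0 : board.getD 0 [] = board.headD [] := by cases board <;> rfl
  -- ---- the A-side pipeline ----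
  have temp0R := rect_replicate (n + 1) (m + 1)
  obtain ⟨t1R, t1G⟩ := skillFold_get2 (R := n) (C := m) skill
    (List.replicate (n + 1) (List.replicate (m + 1) (0 : Int))) hvalid temp0R
  set t1 := skill.foldl skillStep (List.replicate (n + 1) (List.replicate (m + 1) (0 : Int)))
    with ht1
  have t1G' : ∀ i j, get2 t1 i j = sumD skill (fun s => dlt s i j) := by
    intro i j
    rw [t1G i j, get2_replicate, zero_add]
  have hrowPass : rowPass t1 = (List.range (n + 1 - 1)).foldl (fun a i =>
      (List.range (m + 1 - 1)).foldl (fun a' j => upd2 a' i (j + 1) (get2 a' i j)) a) t1 := by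
    unfold rowPass
    rw [t1R.1, rect_getD_length t1R (by omega)]
  obtain ⟨t2R, t2O, t2In⟩ := rowPass_get2 (R := n + 1) (C := m + 1) (by omega)
    (List.range (n + 1 - 1)) List.nodup_range
    (fun x hx => by have := List.mem_range.mp hx; omega) t1 t1R
  rw [← hrowPass] at t2R t2O t2In
  set t2 := rowPass t1 with ht2
  have hcolPass : colPass t2 = (List.range (m + 1 - 1)).foldl (fun a j =>
      (List.range (n + 1 - 1)).foldl (fun a' i => upd2 a' (i + 1) j (get2 a' i j)) a) t2 := by
    unfold colPass
    rw [t2R.1, rect_getD_length t2R (by omega)]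
  obtain ⟨t3R, t3O, t3In⟩ := colPass_get2 (R := n + 1) (C := m + 1) (by omega)
    (List.range (m + 1 - 1)) List.nodup_range
    (fun x hx => by have := List.mem_range.mp hx; omega) t2 t2R
  rw [← hcolPass] at t3R t3O t3In
  set t3 := colPass t2 with ht3
  -- ---- the B-side fold ----
  obtain ⟨fbR, fbG⟩ := bFold_get2 (R := n) (C := m) skill board hvalid hRect
  set fb := skill.foldl applySkill board with hfb
  -- ---- pointwise agreement of the two final tables ----
  have hpoint : ∀ i j, i < n → j < m → get2 board i j + get2 t3 i j = get2 fb i j := by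
    intro i j hi hj
    have h3 : get2 t3 i j = sumD skill (fun s => rectInd s i j) := by
      have e1 : get2 t3 i j = colSum t2 i j :=
        t3In j (List.mem_range.mpr (by omega)) i (by omega)
      have e2 : colSum t2 i j = sumD (List.range (i + 1)) (fun i' => rowSum t1 i' j) := by
        unfold colSum
        apply sumD_congr
        intro i' hi'
        have hi'' : i' < n := by have := List.mem_range.mp hi'; omega
        exact t2In i' (List.mem_range.mpr (by omega)) j (by omega)
      have e3 : sumD (List.range (i + 1)) (fun i' => rowSum t1 i' j) =
          sumD (List.range (i + 1)) (fun i' => sumD (List.range (j + 1))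
            (fun j' => sumD skill (fun s => dlt s i' j'))) := by
        apply sumD_congr
        intro i' _
        unfold rowSum
        exact sumD_congr (fun j' _ => t1G' i' j')
      have e4 : sumD (List.range (i + 1)) (fun i' => sumD (List.range (j + 1))
            (fun j' => sumD skill (fun s => dlt s i' j'))) =
          sumD skill (fun s => sumD (List.range (i + 1)) (fun i' =>
            sumD (List.range (j + 1)) (fun j' => dlt s i' j'))) := by
        rw [sumD_congr (fun i' (_ : i' ∈ List.range (i + 1)) =>
          sumD_swap (List.range (j + 1)) skill (fun j' s => dlt s i' j'))]
        exact sumD_swap (List.range (i + 1)) skill _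
      have e5 : sumD skill (fun s => sumD (List.range (i + 1)) (fun i' =>
            sumD (List.range (j + 1)) (fun j' => dlt s i' j'))) =
          sumD skill (fun s => rectInd s i j) :=
        sumD_congr (fun s hs => dlt_box (hvalid s hs) i j)
      rw [e1, e2, e3, e4, e5]
    rw [h3, fbG i j hi hj]
  -- ---- evaluate both programs to index-based counts ----
  have hA : solution board skill =
      sumD (List.range n) (fun i => (((List.range m).countP
        (fun j => decide (0 < get2 board i j + get2 t3 i j)) : Nat) : Int)) := by
    simp only [solution]
    rw [hw, hg0]
    rw [cntRows_fold (t3 := t3) (b0 := board) (R := n) (C := m) (List.range n)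
      List.nodup_range (fun x hx => List.mem_range.mp hx) board 0 hRect
      (fun _ _ _ => rfl)]
    rw [zero_add]
  have hB : solution_alt board skill =
      sumD (List.range n) (fun i => (((List.range m).countP
        (fun j => decide (0 < get2 fb i j)) : Nat) : Int)) := by
    simp only [solution_alt]
    rw [hw, cntIdx_outer fb m (List.range n) 0, zero_add]
  rw [hA, hB]
  apply sumD_congr
  intro i hi
  have hi' : i < n := List.mem_range.mp hi
  congr 1
  apply List.countP_congr
  intro j hj
  have hj' : j < m := List.mem_range.mp hj
  rw [hpoint i j hi' hj']
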